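-- pv_equiv track=rewrite | github.com/Thewillman/Software-homework-Klotski | AstarFind.py | check
-- ===== SOURCE A (Python) =====
-- def check(map, des):  # 校对当前局势是否有解
--
--     cnt1 = 0
--     cnt2 = 0
--     for i in range(0, len(map)):
--         for j in range(0, i):
--             if map[j] > map[i] and map[i] != 0:
--                 cnt1 = cnt1 + 1
--     for i in range(0, len(des)):
--         for j in range(0, i):
--             if des[j] > des[i] and des[i] != 0:
--                 cnt2 = cnt2 + 1
--     return (cnt1 % 2) == (cnt2 % 2)
-- ===== SOURCE B (Python) =====
-- def _count(a):
--     # merge sort; counts pairs (j < i) with a[j] > a[i] and a[i] != 0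
--     def ms(xs):
--         n = len(xs)
--         if n <= 1:
--             return xs, 0
--         left, cl = ms(xs[:n // 2])
--         right, cr = ms(xs[n // 2:])
--         merged = []
--         cnt = cl + cr
--         i = j = 0
--         while i < len(left) and j < len(right):
--             if left[i] <= right[j]:
--                 merged.append(left[i])
--                 i += 1
--             else:
--                 if right[j] != 0:
--                     cnt += len(left) - i
--                 merged.append(right[j])
--                 j += 1
--         merged.extend(left[i:])
--         merged.extend(right[j:])
--         return merged, cnt
--     return ms(a)[1]
--
-- def check(map, des):
--     return _count(map) % 2 == _count(des) % 2
-- ===== Notes on version B (the rewrite author's own statement) =====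
-- stated objective: faster
-- what changed: Replaced the O(n^2) nested index loops that count pairs j<i with xs[j]>xs[i] and xs[i]!=0 by a merge-sort that counts those pairs during merging, then compares the two parities.
import Mathlib
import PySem

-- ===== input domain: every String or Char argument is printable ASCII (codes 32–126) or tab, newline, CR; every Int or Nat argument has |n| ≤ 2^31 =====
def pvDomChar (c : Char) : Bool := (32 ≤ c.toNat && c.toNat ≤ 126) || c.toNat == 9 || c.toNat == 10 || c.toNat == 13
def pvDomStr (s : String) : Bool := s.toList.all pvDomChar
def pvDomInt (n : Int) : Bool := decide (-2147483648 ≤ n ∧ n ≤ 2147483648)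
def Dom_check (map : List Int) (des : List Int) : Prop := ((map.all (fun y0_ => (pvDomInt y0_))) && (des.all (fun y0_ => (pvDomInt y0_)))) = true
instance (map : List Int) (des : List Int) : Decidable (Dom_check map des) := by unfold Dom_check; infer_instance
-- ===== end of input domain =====

-- B replaces A's O(n^2) nested index loops by a merge-sort inversion count (pairs whose later element is nonzero), comparing the two parities; objective: faster (asymptotic).

-- ===== PORT A =====
-- literal port of A's double index loops (counts pairs j < i with xs[j] > xs[i] and xs[i] != 0, for both lists, then compares parities)
def check (map : List Int) (des : List Int) : Bool :=
  let cnt1 : Int := (PySem.List.pyRange 0 (PySem.List.len map) 1).foldl (fun cnt1 i =>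
    (PySem.List.pyRange 0 i 1).foldl (fun cnt1 j =>
      if PySem.List.pyGetD map j 0 > PySem.List.pyGetD map i 0 ∧ PySem.List.pyGetD map i 0 ≠ 0
      then cnt1 + 1 else cnt1) cnt1) 0
  let cnt2 : Int := (PySem.List.pyRange 0 (PySem.List.len des) 1).foldl (fun cnt2 i =>
    (PySem.List.pyRange 0 i 1).foldl (fun cnt2 j =>
      if PySem.List.pyGetD des j 0 > PySem.List.pyGetD des i 0 ∧ PySem.List.pyGetD des i 0 ≠ 0
      then cnt2 + 1 else cnt2) cnt2) 0
  PySem.Int.mod cnt1 2 == PySem.Int.mod cnt2 2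

-- ===== PORT B =====
-- port of Source B's merge step (the while loop consuming left/right, counting len(left)-i when the taken right element is nonzero)
def mergeCnt : List Int → List Int → List Int × Int
  | [], r => (r, 0)
  | a :: l, [] => (a :: l, 0)
  | a :: l, b :: r =>
    if a ≤ b then
      let p := mergeCnt l (b :: r)
      (a :: p.1, p.2)
    else
      let p := mergeCnt (a :: l) r
      (b :: p.1, p.2 + (if b ≠ 0 then ((a :: l).length : Int) else 0))

-- port of Source B's ms: split at len//2, recurse, merge
def msortCnt (xs : List Int) : List Int × Int :=
  if xs.length ≤ 1 then (xs, 0)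
  else
    let h := xs.length / 2
    let p1 := msortCnt (xs.take h)
    let p2 := msortCnt (xs.drop h)
    let p := mergeCnt p1.1 p2.1
    (p.1, p1.2 + p2.2 + p.2)
termination_by xs.length
decreasing_by
  · simp; omega
  · simp; omega

def check_alt (map : List Int) (des : List Int) : Bool :=
  PySem.Int.mod (msortCnt map).2 2 == PySem.Int.mod (msortCnt des).2 2

-- ===== PRECONDITION & SPEC =====
def Spec_check (map : List Int) (des : List Int) (out : Bool) : Prop := out = check_alt map des
instance (map : List Int) (des : List Int) (out : Bool) : Decidable (Spec_check map des out) := by unfold Spec_check; infer_instance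

-- ===== CLAIM (what is proved, stated in full; the proofs are below) =====
def Claim_equal_check : Prop := ∀ (map : List Int) (des : List Int), Dom_check map des → Spec_check map des (check map des)

-- ===== LEMMAS AND PROOFS =====

-- number of pairs (x from l, y from r) with x > y and y ≠ 0
def crossC (l r : List Int) : Nat :=
  (r.map (fun y => if y ≠ 0 then l.countP (fun x => decide (y < x)) else 0)).sum

-- A's counted quantity, structurally: pairs (j < i) with xs[j] > xs[i] and xs[i] ≠ 0
def invC : List Int → Nat
  | [] => 0
  | x :: xs => crossC [x] xs + invC xs

theorem crossC_nil_left (r : List Int) : crossC [] r = 0 := by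
  simp [crossC]

theorem crossC_cons_right (l : List Int) (y : Int) (r : List Int) :
    crossC l (y :: r) = (if y ≠ 0 then l.countP (fun x => decide (y < x)) else 0) + crossC l r := by
  simp [crossC]

theorem crossC_cons_left (x : Int) (l r : List Int) :
    crossC (x :: l) r = crossC [x] r + crossC l r := by
  induction r with
  | nil => rfl
  | cons y r ih =>
    simp only [crossC_cons_right, ih, List.countP_cons, List.countP_nil]
    split_ifs <;> omega

theorem crossC_append_right (l r1 r2 : List Int) :
    crossC l (r1 ++ r2) = crossC l r1 + crossC l r2 := by
  simp [crossC]

theorem crossC_perm_left {l l' : List Int} (h : l.Perm l') (r : List Int) :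
    crossC l r = crossC l' r := by
  simp [crossC, h.countP_eq]

theorem crossC_perm_right (l : List Int) {r r' : List Int} (h : r.Perm r') :
    crossC l r = crossC l r' := by
  exact (h.map _).sum_eq

theorem crossC_singleton_of_le (a : Int) (r : List Int) (h : ∀ y ∈ r, a ≤ y) :
    crossC [a] r = 0 := by
  induction r with
  | nil => rfl
  | cons y r ih =>
    rw [crossC_cons_right, ih (fun y hy => h y (List.mem_cons_of_mem _ hy))]
    have hya : ¬ (y < a) := not_lt.2 (h y List.mem_cons_self)
    simp [hya]

theorem invC_cons (x : Int) (xs : List Int) : invC (x :: xs) = crossC [x] xs + invC xs := rfl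

theorem invC_append (l1 l2 : List Int) :
    invC (l1 ++ l2) = invC l1 + invC l2 + crossC l1 l2 := by
  induction l1 with
  | nil => simp only [List.nil_append, crossC_nil_left]; have h0 : invC [] = 0 := rfl; omega
  | cons x l1 ih =>
    rw [List.cons_append, invC_cons, invC_cons, ih, crossC_append_right, crossC_cons_left x l1 l2]
    omega

theorem mergeCnt_spec : ∀ l r : List Int, l.Pairwise (· ≤ ·) → r.Pairwise (· ≤ ·) →
    (mergeCnt l r).1.Perm (l ++ r) ∧ (mergeCnt l r).1.Pairwise (· ≤ ·) ∧
    (mergeCnt l r).2 = (crossC l r : Int)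
  | [], r, _, hr => by
    simp [mergeCnt, crossC_nil_left, hr]
  | a :: l, [], hl, _ => by
    simp [mergeCnt, crossC, hl]
  | a :: l, b :: r, hl, hr => by
    rw [mergeCnt]
    rcases List.pairwise_cons.1 hl with ⟨ha, hl'⟩
    rcases List.pairwise_cons.1 hr with ⟨hb, hr'⟩
    by_cases hab : a ≤ b
    · rw [if_pos hab]
      obtain ⟨hperm, hsort, hcnt⟩ := mergeCnt_spec l (b :: r) hl' hr
      refine ⟨?_, ?_, ?_⟩
      · exact hperm.cons a
      · show List.Pairwise (· ≤ ·) (a :: (mergeCnt l (b :: r)).1)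
        refine List.pairwise_cons.2 ⟨?_, hsort⟩
        intro y hy
        rcases List.mem_append.1 (hperm.mem_iff.1 hy) with h | h
        · exact ha y h
        · rcases List.mem_cons.1 h with rfl | h
          · exact hab
          · exact le_trans hab (hb y h)
      · show (mergeCnt l (b :: r)).2 = (crossC (a :: l) (b :: r) : Nat)
        rw [hcnt, crossC_cons_left, crossC_singleton_of_le a (b :: r) ?_]
        · simp
        · intro y hy
          rcases List.mem_cons.1 hy with rfl | h
          · exact hab
          · exact le_trans hab (hb y h)
    · rw [if_neg hab]
      obtain ⟨hperm, hsort, hcnt⟩ := mergeCnt_spec (a :: l) r hl hr'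
      have hba : b < a := lt_of_not_ge hab
      refine ⟨?_, ?_, ?_⟩
      · exact (hperm.cons b).trans (List.perm_middle (l₁ := a :: l) (l₂ := r)).symm
      · show List.Pairwise (· ≤ ·) (b :: (mergeCnt (a :: l) r).1)
        refine List.pairwise_cons.2 ⟨?_, hsort⟩
        intro y hy
        rcases List.mem_append.1 (hperm.mem_iff.1 hy) with h | h
        · rcases List.mem_cons.1 h with rfl | h
          · exact le_of_lt hba
          · exact le_trans (le_of_lt hba) (ha y h)
        · exact hb y h
      · show (mergeCnt (a :: l) r).2 + (if b ≠ 0 then ((a :: l).length : Int) else 0)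
            = (crossC (a :: l) (b :: r) : Nat)
        rw [hcnt, crossC_cons_right (a :: l) b r]
        have hcount : (a :: l).countP (fun x => decide (b < x)) = (a :: l).length := by
          refine List.countP_eq_length.2 ?_
          intro x hx
          rcases List.mem_cons.1 hx with rfl | h
          · simpa using hba
          · simp only [decide_eq_true_eq]
            exact lt_of_lt_of_le hba (ha x h)
        split_ifs with hb0
        · rw [hcount]; push_cast; ring
        · push_cast; ring

theorem msortCnt_spec (xs : List Int) :
    (msortCnt xs).1.Perm xs ∧ (msortCnt xs).1.Pairwise (· ≤ ·) ∧
    (msortCnt xs).2 = (invC xs : Int) := by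
  rw [msortCnt]
  split_ifs with h1
  · match xs, h1 with
    | [], _ => simp [invC]
    | [x], _ => simp [invC, crossC]
  · have ht := msortCnt_spec (xs.take (xs.length / 2))
    have hd := msortCnt_spec (xs.drop (xs.length / 2))
    obtain ⟨tp, ts, tc⟩ := ht
    obtain ⟨dp, ds, dc⟩ := hd
    obtain ⟨mp, msorted, mc⟩ := mergeCnt_spec _ _ ts ds
    refine ⟨?_, msorted, ?_⟩
    · exact (mp.trans (tp.append dp)).trans (by rw [List.take_append_drop])
    · simp only [mc, tc, dc]
      rw [crossC_perm_left tp, crossC_perm_right _ dp]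
      have := invC_append (xs.take (xs.length / 2)) (xs.drop (xs.length / 2))
      rw [List.take_append_drop] at this
      rw [this]; push_cast; ring
termination_by xs.length
decreasing_by
  · simp; omega
  · simp; omega

theorem invC_append_singleton (ys : List Int) (z : Int) :
    invC (ys ++ [z]) = invC ys +
      (if z ≠ 0 then ys.countP (fun x => decide (z < x)) else 0) := by
  rw [invC_append]
  have h1 : invC [z] = 0 := by
    rw [invC_cons]; simp [crossC]; rfl
  have h2 : crossC ys [z] = if z ≠ 0 then ys.countP (fun x => decide (z < x)) else 0 := by
    simp [crossC]
  rw [h1, h2]; omega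

-- A's loop over one list computes invC
theorem loopA_eq (xs : List Int) (a : Int) :
    (PySem.List.pyRange 0 (PySem.List.len xs) 1).foldl (fun c i =>
      (PySem.List.pyRange 0 i 1).foldl (fun c j =>
        if PySem.List.pyGetD xs j 0 > PySem.List.pyGetD xs i 0 ∧ PySem.List.pyGetD xs i 0 ≠ 0
        then c + 1 else c) c) a = a + (invC xs : Int) := by
  induction xs using List.reverseRecOn generalizing a with
  | nil => simp [PySem.List.pyRange_one_eq_nil, invC]
  | append_singleton ys z ih =>
    have hlen : PySem.List.len (ys ++ [z]) = (ys.length : Int) + 1 := by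
      simp [PySem.List.len_eq]
    have hgetlast : PySem.List.pyGetD (ys ++ [z]) ((ys.length : Int)) 0 = z := by
      rw [PySem.List.pyGetD_natCast]
      simp
    have hgetlt : ∀ i : Int, 0 ≤ i → i < (ys.length : Int) →
        PySem.List.pyGetD (ys ++ [z]) i 0 = PySem.List.pyGetD ys i 0 := by
      intro i h0 hi
      rw [PySem.List.pyGetD_eq_getElem _ _ h0 (by simp; omega),
          PySem.List.pyGetD_eq_getElem _ _ h0 (by omega)]
      rw [List.getElem_append_left]
    rw [hlen, PySem.List.pyRange_one_succ_right (by positivity), List.foldl_append,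
        List.foldl_cons, List.foldl_nil]
    have h1 : List.foldl (fun c i =>
        (PySem.List.pyRange 0 i 1).foldl (fun c j =>
          if PySem.List.pyGetD (ys ++ [z]) j 0 > PySem.List.pyGetD (ys ++ [z]) i 0 ∧
             PySem.List.pyGetD (ys ++ [z]) i 0 ≠ 0
          then c + 1 else c) c) a (PySem.List.pyRange 0 (ys.length : Int) 1)
        = a + (invC ys : Int) := by
      rw [PySem.List.foldl_congr_mem _ _ (fun c i =>
        (PySem.List.pyRange 0 i 1).foldl (fun c j =>
          if PySem.List.pyGetD ys j 0 > PySem.List.pyGetD ys i 0 ∧ PySem.List.pyGetD ys i 0 ≠ 0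
          then c + 1 else c) c) _ ?_]
      · have := ih a
        rw [PySem.List.len_eq] at this
        exact this
      · intro acc i hi
        rcases PySem.List.mem_pyRange_one.1 hi with ⟨h0, hilt⟩
        rw [hgetlt i h0 hilt]
        exact PySem.List.foldl_congr_mem _ _ _ _ (fun acc' j hj => by
          rcases PySem.List.mem_pyRange_one.1 hj with ⟨hj0, hjlt⟩
          rw [hgetlt j hj0 (lt_trans hjlt hilt)])
    rw [h1, hgetlast]
    by_cases hz : z = 0
    · rw [PySem.List.foldl_congr_mem _ _ (fun c j => c) _ (fun acc j _ => by simp [hz])]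
      rw [PySem.List.foldl_ignore, invC_append_singleton]
      simp [hz]
    · rw [PySem.List.foldl_congr_mem _ _ (fun c j =>
        if z < PySem.List.pyGetD ys j 0 then c + 1 else c) _ ?_]
      · rw [show ((ys.length : Int)) = (ys.length : Int) from rfl]
        rw [PySem.List.foldl_pyRange_zero_pyGetD' ys 0 (fun c x => if z < x then c + 1 else c)]
        rw [PySem.List.foldl_ite_add_one (fun x => z < x)]
        rw [invC_append_singleton]
        simp only [hz, ne_eq, not_false_eq_true, if_true]
        push_cast
        ring
      · intro acc j hj
        rcases PySem.List.mem_pyRange_one.1 hj with ⟨hj0, hjlt⟩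
        rw [hgetlt j hj0 hjlt]
        simp [hz, gt_iff_lt]

-- ===== VERDICT (by name: the statement is the Claim_ definition above) =====
theorem check_spec : Claim_equal_check := by
  intro map des _
  unfold Spec_check check check_alt
  simp only [loopA_eq, (msortCnt_spec map).2.2, (msortCnt_spec des).2.2, zero_add]
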